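-- pv_equiv track=rewrite | github.com/Nakasone-nsa/AutoMKV | mux_pt-BR.py | associar_legendas_e_audio
-- ===== SOURCE A (Python) =====
-- def associar_legendas_e_audio(videos, legendas, audios):
--     associacoes = {}
--     for video in videos:
--         base_nome = video.rsplit('.', 1)[0]
--         associacoes[video] = {
--             'legendas': [legenda for legenda in legendas if legenda.startswith(base_nome)],
--             'audios': [audio for audio in audios if audio.startswith(base_nome)]
--         }
--     return associacoes
-- ===== SOURCE B (Python) =====
-- def associar_legendas_e_audio(videos, legendas, audios):
--     # media-major traversal: one pass over legendas and one over audios,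
--     # distributing each file into the buckets of the videos it matches
--     entries = [[video, video.rsplit('.', 1)[0], [], []] for video in videos]
--     for legenda in legendas:
--         for e in entries:
--             if legenda.startswith(e[1]):
--                 e[2].append(legenda)
--     for audio in audios:
--         for e in entries:
--             if audio.startswith(e[1]):
--                 e[3].append(audio)
--     return {v: {'legendas': legs, 'audios': auds} for v, _, legs, auds in entries}
-- ===== Notes on version B (the rewrite author's own statement) =====
-- stated objective: alternative
-- what changed: Inverted the traversal: instead of scanning all legendas and audios once per video, B makes one pass over legendas and one over audios, distributing each file into per-video buckets built up alongside the precomputed base names.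
import Mathlib
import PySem

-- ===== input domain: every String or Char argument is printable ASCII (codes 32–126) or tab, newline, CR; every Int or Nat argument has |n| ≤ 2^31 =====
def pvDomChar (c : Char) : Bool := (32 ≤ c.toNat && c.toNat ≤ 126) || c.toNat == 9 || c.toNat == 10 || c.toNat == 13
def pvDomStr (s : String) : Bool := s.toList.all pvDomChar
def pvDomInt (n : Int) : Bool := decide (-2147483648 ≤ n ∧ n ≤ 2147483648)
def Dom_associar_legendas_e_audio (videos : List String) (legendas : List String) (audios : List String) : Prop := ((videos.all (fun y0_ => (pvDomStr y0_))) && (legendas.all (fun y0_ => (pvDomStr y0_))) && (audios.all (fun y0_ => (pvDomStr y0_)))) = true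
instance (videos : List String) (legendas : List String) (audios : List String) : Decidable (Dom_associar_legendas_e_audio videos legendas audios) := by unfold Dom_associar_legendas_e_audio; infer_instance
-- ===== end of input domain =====

-- B replaces A's video-major scans (all legendas/audios re-scanned per video) by a media-major
-- distribution into per-video buckets: an alternative traversal, same results, same asymptotic cost.

-- ===== PORT A =====
-- shared helper: s.rsplit('.', 1)[0] over the character list
-- (chars strictly before the LAST '.', or the whole string if there is no '.'); exact by construction
def pvBaseChars : List Char → Option (List Char)
  | [] => none
  | c :: rest =>
    match pvBaseChars rest with
    | some t => some (c :: t)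
    | none => if c = '.' then some [] else none

def pvBaseName (s : String) : String :=
  match pvBaseChars s.toList with
  | some t => String.ofList t
  | none => s

def associar_legendas_e_audio (videos : List String) (legendas : List String) (audios : List String) : List (String × List (String × List String)) :=
  (videos.foldl
    (fun (associacoes : PySem.Dict String (List (String × List String))) video =>
      let base_nome := pvBaseName video
      associacoes.insert video
        [("legendas", legendas.filter (fun legenda => PySem.Str.startswith legenda base_nome)),
         ("audios", audios.filter (fun audio => PySem.Str.startswith audio base_nome))])
    PySem.Dict.empty).items

-- ===== PORT B =====
-- an entry is (video, base name, legendas bucket, audios bucket)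
def associar_legendas_e_audio_alt (videos : List String) (legendas : List String) (audios : List String) : List (String × List (String × List String)) :=
  let entries0 := videos.map (fun v => (v, pvBaseName v, ([] : List String), ([] : List String)))
  let entries1 := legendas.foldl
    (fun es legenda => es.map (fun e =>
      if PySem.Str.startswith legenda e.2.1 then (e.1, e.2.1, e.2.2.1 ++ [legenda], e.2.2.2) else e)) entries0
  let entries2 := audios.foldl
    (fun es audio => es.map (fun e =>
      if PySem.Str.startswith audio e.2.1 then (e.1, e.2.1, e.2.2.1, e.2.2.2 ++ [audio]) else e)) entries1
  (entries2.foldl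
    (fun (res : PySem.Dict String (List (String × List String))) e =>
      res.insert e.1 [("legendas", e.2.2.1), ("audios", e.2.2.2)])
    PySem.Dict.empty).items

-- ===== PRECONDITION & SPEC =====
def Spec_associar_legendas_e_audio (videos : List String) (legendas : List String) (audios : List String) (out : List (String × List (String × List String))) : Prop := out = associar_legendas_e_audio_alt videos legendas audios
instance (videos : List String) (legendas : List String) (audios : List String) (out : List (String × List (String × List String))) : Decidable (Spec_associar_legendas_e_audio videos legendas audios out) := by unfold Spec_associar_legendas_e_audio; infer_instance

-- ===== CLAIM (what is proved, stated in full; the proofs are below) =====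
def Claim_equal_associar_legendas_e_audio : Prop := ∀ (videos : List String) (legendas : List String) (audios : List String), Dom_associar_legendas_e_audio videos legendas audios → Spec_associar_legendas_e_audio videos legendas audios (associar_legendas_e_audio videos legendas audios)

-- ===== LEMMAS AND PROOFS =====
-- distributing the legendas one by one fills each bucket with exactly the filter A computes
theorem pv_distrib_leg (xs : List String)
    (es : List (String × String × List String × List String)) :
    xs.foldl (fun es legenda => es.map (fun e =>
      if PySem.Str.startswith legenda e.2.1 then (e.1, e.2.1, e.2.2.1 ++ [legenda], e.2.2.2) else e)) es
    = es.map (fun e => (e.1, e.2.1,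
        e.2.2.1 ++ xs.filter (fun x => PySem.Str.startswith x e.2.1), e.2.2.2)) := by
  induction xs generalizing es with
  | nil => simp
  | cons x xs ih =>
    simp only [List.foldl_cons, ih, List.map_map]
    refine List.map_congr_left (fun e _ => ?_)
    simp only [Function.comp_apply, List.filter_cons]
    by_cases h : PySem.Chars.startswith x.toList e.2.1.toList = true <;> simp [h]

-- the same for the audios pass (which leaves the legendas bucket untouched)
theorem pv_distrib_aud (xs : List String)
    (es : List (String × String × List String × List String)) :
    xs.foldl (fun es audio => es.map (fun e =>
      if PySem.Str.startswith audio e.2.1 then (e.1, e.2.1, e.2.2.1, e.2.2.2 ++ [audio]) else e)) es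
    = es.map (fun e => (e.1, e.2.1, e.2.2.1,
        e.2.2.2 ++ xs.filter (fun x => PySem.Str.startswith x e.2.1))) := by
  induction xs generalizing es with
  | nil => simp
  | cons x xs ih =>
    simp only [List.foldl_cons, ih, List.map_map]
    refine List.map_congr_left (fun e _ => ?_)
    simp only [Function.comp_apply, List.filter_cons]
    by_cases h : PySem.Chars.startswith x.toList e.2.1.toList = true <;> simp [h]

-- ===== VERDICT (by name: the statement is the Claim_ definition above) =====
theorem associar_legendas_e_audio_spec : Claim_equal_associar_legendas_e_audio := by
  intro videos legendas audios _
  unfold Spec_associar_legendas_e_audio associar_legendas_e_audio associar_legendas_e_audio_alt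
  simp only [pv_distrib_leg, pv_distrib_aud, List.map_map, List.foldl_map,
    Function.comp_apply, List.nil_append]
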